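-- pv_equiv track=rewrite | github.com/cory-weiner/python-euler | 17.py | solution
-- ===== SOURCE A (Python) =====
-- twenty_map = {
--     0:'',
--     1:'one',
--     2:'two',
--     3:'three',
--     4:'four',
--     5:'five',
--     6:'six',
--     7:'seven',
--     8:'eight',
--     9:'nine',
--     10:'ten',
--     11:'eleven',
--     12:'twelve',
--     13:'thirteen',
--     14:'fourteen',
--     15:'fifteen',
--     16:'sixteen',
--     17:'seventeen',
--     18:'eighteen',
--     19:'nineteen'
-- }
--
-- tens_map = {
--     10:'ten',
--     20:'twenty',
--     30:'thirty',
--     40:'forty',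
--     50:'fifty',
--     60:'sixty',
--     70:'seventy',
--     80:'eighty',
--     90:'ninety'
-- }
--
-- num_length_map = {
--     1: 'hundred',
--     2: 'thousand',
--     3: 'milllion'
-- }
--
-- def get_num_string(num):
--     places_arr = breakout_places(num)
--     place_len = len(places_arr)
--     word_str = ''
--     for i,v in enumerate(places_arr):
--         place = place_len - i
--         word_str += three_digit_num_word(''.join(v))
--         if place > 1:
--             word_str += ' ' + num_length_map[place] + ' '
--     return word_str
--
-- def breakout_places(n):
--     numstring = str(n)
--     str_arr = []
--     while numstring:
--         new_arr = [c for c in numstring[-3:]]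
--         str_arr.insert(0,new_arr)
--         numstring = numstring[:-3]
--     return str_arr
--
-- def three_digit_num_word(n):
--     # Returns the word of a number up to three digits
--     n = int(n)
--     if n <= 19:
--         return twenty_map[n]
--     if n > 99:
--         first_dig = int(str(n)[0])
--         last_two_dig = str(n)[-2:]
--         # if last_two_dig[0] == '0':
--         #     tens_place = ''
--         # else:
--         if last_two_dig == '00':
--             return twenty_map[first_dig] + ' hundred'
--         if int(last_two_dig) <= 19:
--             return twenty_map[first_dig] + ' hundred and ' + twenty_map[int(last_two_dig)]
--         tens_place = tens_map[int(last_two_dig[0])*10]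
--         return twenty_map[first_dig] + ' hundred and ' + tens_place + twenty_map[int(last_two_dig[1])]
--     return tens_map[int(str(n)[0])*10] + twenty_map[int(str(n)[1])]
--
-- def solution(n):
--     solution_arr = []
--     for i in range(1,n+1):
--         solution_arr.append(get_num_string(i).replace(' ',''))
--     i = 0
--     for v in solution_arr:
--         i+= len(v)
--     return i
-- ===== SOURCE B (Python) =====
-- def solution(n):
--     # Letter counts computed purely arithmetically from a 1000-entry table of
--     # three-digit-group letter counts; no number-word strings are ever built.
--     small = [0, 3, 3, 5, 4, 4, 3, 5, 5, 4, 3, 6, 6, 8, 8, 7, 7, 9, 8, 8]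
--     tens = [0, 3, 6, 6, 5, 5, 5, 7, 6, 6]
--     C = []
--     for h in range(10):
--         for t in range(10):
--             for u in range(10):
--                 m = 100 * h + 10 * t + u
--                 if m < 20:
--                     v = small[m]
--                 elif m < 100:
--                     v = tens[t] + small[u]
--                 elif t == 0 and u == 0:
--                     v = small[h] + 7          # 'hundred'
--                 elif 10 * t + u < 20:
--                     v = small[h] + 10 + small[10 * t + u]   # 'hundred and ...'
--                 else:
--                     v = small[h] + 10 + tens[t] + small[u]
--                 C.append(v)
--     total = 0
--     for i in range(1, n + 1):
--         q, r = divmod(i, 1000)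
--         total += C[r]
--         while q:
--             q, r = divmod(q, 1000)
--             total += C[r] + 8     # each scale word ('thousand'/'milllion') has 8 letters
--     return total
-- ===== Notes on version B (the rewrite author's own statement) =====
-- stated objective: faster
-- what changed: B never builds number-word strings: it precomputes a 1000-entry table of letter counts for three-digit groups and sums per-number counts by pure integer divmod arithmetic (plus 8 per scale word), instead of A's per-number decimal-string splitting, dictionary word construction and space-stripping.
import Mathlib
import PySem

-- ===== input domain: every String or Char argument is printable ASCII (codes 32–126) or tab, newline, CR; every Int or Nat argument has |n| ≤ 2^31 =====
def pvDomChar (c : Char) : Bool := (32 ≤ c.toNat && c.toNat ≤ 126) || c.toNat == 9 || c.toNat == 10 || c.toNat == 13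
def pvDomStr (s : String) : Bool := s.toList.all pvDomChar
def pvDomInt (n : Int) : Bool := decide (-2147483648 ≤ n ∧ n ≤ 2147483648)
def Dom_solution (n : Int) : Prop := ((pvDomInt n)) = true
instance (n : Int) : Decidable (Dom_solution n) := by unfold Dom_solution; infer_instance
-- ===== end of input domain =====

-- B replaces A's per-number word-string construction (decimal string, 3-char groups,
-- dictionary word lookups, space stripping) by pure integer arithmetic over a
-- precomputed 1000-entry table of per-group letter counts; measurably faster by a
-- constant factor, same O(n) loop over 1..n.


-- ===== PORT A =====
-- Strings are carried as 'List Char' throughout (PySem string functions are defined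
-- on List Char); dict lookups d[k] are ported as Dict.getD (every lookup A performs on
-- an admitted input hits an existing key; on n ≥ 10^9 A raises KeyError — excluded by Pre_).

def twentyMap : PySem.Dict Int (List Char) := PySem.Dict.ofList
  [(0, "".toList), (1, "one".toList), (2, "two".toList), (3, "three".toList),
   (4, "four".toList), (5, "five".toList), (6, "six".toList), (7, "seven".toList),
   (8, "eight".toList), (9, "nine".toList), (10, "ten".toList), (11, "eleven".toList),
   (12, "twelve".toList), (13, "thirteen".toList), (14, "fourteen".toList),
   (15, "fifteen".toList), (16, "sixteen".toList), (17, "seventeen".toList),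
   (18, "eighteen".toList), (19, "nineteen".toList)]

def tensMap : PySem.Dict Int (List Char) := PySem.Dict.ofList
  [(10, "ten".toList), (20, "twenty".toList), (30, "thirty".toList), (40, "forty".toList),
   (50, "fifty".toList), (60, "sixty".toList), (70, "seventy".toList), (80, "eighty".toList),
   (90, "ninety".toList)]

def numLengthMap : PySem.Dict Int (List Char) := PySem.Dict.ofList
  [(1, "hundred".toList), (2, "thousand".toList), (3, "milllion".toList)]

-- 'while numstring: str_arr.insert(0, [c for c in numstring[-3:]]); numstring = numstring[:-3]'
def breakoutLoop (numstring : List Char) (strArr : List (List Char)) : List (List Char) :=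
  if h : numstring = [] then strArr
  else
    breakoutLoop (PySem.List.slice numstring none (some (-3)))
      (PySem.List.insert strArr 0 (PySem.List.slice numstring (some (-3)) none))
termination_by numstring.length
decreasing_by
  rw [PySem.List.slice_to_neg_ofNat numstring 3 (by omega)]
  have : numstring.length ≠ 0 := fun hc => h (List.eq_nil_of_length_eq_zero hc)
  simp [List.length_take]; omega

def breakoutPlaces (n : Int) : List (List Char) :=
  breakoutLoop (PySem.Int.toChars n) []

-- three_digit_num_word after 'n = int(n)'; int(c) of a single char c is ofChars? [c]
def threeDigitOfInt (n : Int) : List Char :=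
  if n ≤ 19 then twentyMap.getD n []
  else if n > 99 then
    let s := PySem.Int.toChars n
    let firstDig := (PySem.Int.ofChars? [PySem.List.pyGetD s 0 ' ']).getD 0
    let lastTwo := PySem.List.slice s (some (-2)) none
    if lastTwo = "00".toList then twentyMap.getD firstDig [] ++ " hundred".toList
    else if (PySem.Int.ofChars? lastTwo).getD 0 ≤ 19 then
      twentyMap.getD firstDig [] ++ " hundred and ".toList
        ++ twentyMap.getD ((PySem.Int.ofChars? lastTwo).getD 0) []
    else
      let tensPlace := tensMap.getD ((PySem.Int.ofChars? [PySem.List.pyGetD lastTwo 0 ' ']).getD 0 * 10) []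
      twentyMap.getD firstDig [] ++ " hundred and ".toList ++ tensPlace
        ++ twentyMap.getD ((PySem.Int.ofChars? [PySem.List.pyGetD lastTwo 1 ' ']).getD 0) []
  else
    tensMap.getD ((PySem.Int.ofChars? [PySem.List.pyGetD (PySem.Int.toChars n) 0 ' ']).getD 0 * 10) []
      ++ twentyMap.getD ((PySem.Int.ofChars? [PySem.List.pyGetD (PySem.Int.toChars n) 1 ' ']).getD 0) []

def threeDigitNumWord (cs : List Char) : List Char :=
  threeDigitOfInt ((PySem.Int.ofChars? cs).getD 0)

-- ''.join(v) where v is the list of the characters of a group is that group's characters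
def getNumString (num : Int) : List Char :=
  let placesArr := breakoutPlaces num
  let placeLen := PySem.List.len placesArr
  (PySem.List.enumerate placesArr).foldl (fun wordStr iv =>
    let w := wordStr ++ threeDigitNumWord iv.2
    if placeLen - iv.1 > 1 then w ++ (' ' :: numLengthMap.getD (placeLen - iv.1) [] ++ [' '])
    else w) []

def solution (n : Int) : Int :=
  let solutionArr := (PySem.List.pyRange 1 (n + 1) 1).foldl
    (fun arr i => arr ++ [PySem.Chars.replace (getNumString i) " ".toList "".toList]) []
  solutionArr.foldl (fun acc v => acc + PySem.List.len v) 0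

-- ===== PORT B =====
def smallTab : List Int := [0, 3, 3, 5, 4, 4, 3, 5, 5, 4, 3, 6, 6, 8, 8, 7, 7, 9, 8, 8]
def tensTab : List Int := [0, 3, 6, 6, 5, 5, 5, 7, 6, 6]

def cTable : List Int :=
  (PySem.List.pyRange 0 10 1).foldl (fun C h =>
    (PySem.List.pyRange 0 10 1).foldl (fun C t =>
      (PySem.List.pyRange 0 10 1).foldl (fun C u =>
        let m := 100 * h + 10 * t + u
        let v : Int :=
          if m < 20 then PySem.List.pyGetD smallTab m 0
          else if m < 100 then PySem.List.pyGetD tensTab t 0 + PySem.List.pyGetD smallTab u 0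
          else if t = 0 ∧ u = 0 then PySem.List.pyGetD smallTab h 0 + 7
          else if 10 * t + u < 20 then
            PySem.List.pyGetD smallTab h 0 + 10 + PySem.List.pyGetD smallTab (10 * t + u) 0
          else PySem.List.pyGetD smallTab h 0 + 10 + PySem.List.pyGetD tensTab t 0
            + PySem.List.pyGetD smallTab u 0
        C ++ [v]) C) C) []

-- 'while q: q, r = divmod(q, 1000); total += C[r] + 8' — q ≥ 0 whenever reached (q = i // 1000, i ≥ 1),
-- so the truthiness test 'q' is ported as 0 < q.
def groupLoop (q : Int) (total : Int) : Int :=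
  if h : 0 < q then
    groupLoop (PySem.Int.floordiv q 1000)
      (total + PySem.List.pyGetD cTable (PySem.Int.mod q 1000) 0 + 8)
  else total
termination_by q.toNat
decreasing_by
  rw [PySem.Int.floordiv_eq_ediv_of_pos (by omega)]
  omega

def solution_alt (n : Int) : Int :=
  (PySem.List.pyRange 1 (n + 1) 1).foldl (fun total i =>
    groupLoop (PySem.Int.floordiv i 1000)
      (total + PySem.List.pyGetD cTable (PySem.Int.mod i 1000) 0)) 0

-- ===== PRECONDITION & SPEC =====
-- A raises KeyError (num_length_map[4]) as soon as the loop reaches i = 10^9, i.e. on every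
-- n ≥ 10^9; Pre_ excludes exactly those n (A returns normally on every n < 10^9).
def Pre_solution (n : Int) : Prop := n < 1000000000
instance (n : Int) : Decidable (Pre_solution n) := by unfold Pre_solution; infer_instance

def pvWitness_solution : Int := 1005

def Spec_solution (n : Int) (out : Int) : Prop := out = solution_alt n
instance (n : Int) (out : Int) : Decidable (Spec_solution n out) := by unfold Spec_solution; infer_instance

-- ===== CLAIM (what is proved, stated in full; the proofs are below) =====
def Claim_equal_solution : Prop := ∀ (n : Int), Dom_solution n → Pre_solution n → Spec_solution n (solution n)

-- ===== LEMMAS AND PROOFS =====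

def cList : List Int := [
  0, 3, 3, 5, 4, 4, 3, 5, 5, 4, 3, 6, 6, 8, 8, 7, 7, 9, 8, 8, 6, 9, 9, 11, 10, 10, 9, 11, 11, 10, 6, 9, 9, 11, 10, 10, 9, 11, 11, 10, 5, 8, 8, 10, 9, 9, 8, 10, 10, 9,
  5, 8, 8, 10, 9, 9, 8, 10, 10, 9, 5, 8, 8, 10, 9, 9, 8, 10, 10, 9, 7, 10, 10, 12, 11, 11, 10, 12, 12, 11, 6, 9, 9, 11, 10, 10, 9, 11, 11, 10, 6, 9, 9, 11, 10, 10, 9, 11, 11, 10,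
  10, 16, 16, 18, 17, 17, 16, 18, 18, 17, 16, 19, 19, 21, 21, 20, 20, 22, 21, 21, 19, 22, 22, 24, 23, 23, 22, 24, 24, 23, 19, 22, 22, 24, 23, 23, 22, 24, 24, 23, 18, 21, 21, 23, 22, 22, 21, 23, 23, 22,
  18, 21, 21, 23, 22, 22, 21, 23, 23, 22, 18, 21, 21, 23, 22, 22, 21, 23, 23, 22, 20, 23, 23, 25, 24, 24, 23, 25, 25, 24, 19, 22, 22, 24, 23, 23, 22, 24, 24, 23, 19, 22, 22, 24, 23, 23, 22, 24, 24, 23,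
  10, 16, 16, 18, 17, 17, 16, 18, 18, 17, 16, 19, 19, 21, 21, 20, 20, 22, 21, 21, 19, 22, 22, 24, 23, 23, 22, 24, 24, 23, 19, 22, 22, 24, 23, 23, 22, 24, 24, 23, 18, 21, 21, 23, 22, 22, 21, 23, 23, 22,
  18, 21, 21, 23, 22, 22, 21, 23, 23, 22, 18, 21, 21, 23, 22, 22, 21, 23, 23, 22, 20, 23, 23, 25, 24, 24, 23, 25, 25, 24, 19, 22, 22, 24, 23, 23, 22, 24, 24, 23, 19, 22, 22, 24, 23, 23, 22, 24, 24, 23,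
  12, 18, 18, 20, 19, 19, 18, 20, 20, 19, 18, 21, 21, 23, 23, 22, 22, 24, 23, 23, 21, 24, 24, 26, 25, 25, 24, 26, 26, 25, 21, 24, 24, 26, 25, 25, 24, 26, 26, 25, 20, 23, 23, 25, 24, 24, 23, 25, 25, 24,
  20, 23, 23, 25, 24, 24, 23, 25, 25, 24, 20, 23, 23, 25, 24, 24, 23, 25, 25, 24, 22, 25, 25, 27, 26, 26, 25, 27, 27, 26, 21, 24, 24, 26, 25, 25, 24, 26, 26, 25, 21, 24, 24, 26, 25, 25, 24, 26, 26, 25,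
  11, 17, 17, 19, 18, 18, 17, 19, 19, 18, 17, 20, 20, 22, 22, 21, 21, 23, 22, 22, 20, 23, 23, 25, 24, 24, 23, 25, 25, 24, 20, 23, 23, 25, 24, 24, 23, 25, 25, 24, 19, 22, 22, 24, 23, 23, 22, 24, 24, 23,
  19, 22, 22, 24, 23, 23, 22, 24, 24, 23, 19, 22, 22, 24, 23, 23, 22, 24, 24, 23, 21, 24, 24, 26, 25, 25, 24, 26, 26, 25, 20, 23, 23, 25, 24, 24, 23, 25, 25, 24, 20, 23, 23, 25, 24, 24, 23, 25, 25, 24,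
  11, 17, 17, 19, 18, 18, 17, 19, 19, 18, 17, 20, 20, 22, 22, 21, 21, 23, 22, 22, 20, 23, 23, 25, 24, 24, 23, 25, 25, 24, 20, 23, 23, 25, 24, 24, 23, 25, 25, 24, 19, 22, 22, 24, 23, 23, 22, 24, 24, 23,
  19, 22, 22, 24, 23, 23, 22, 24, 24, 23, 19, 22, 22, 24, 23, 23, 22, 24, 24, 23, 21, 24, 24, 26, 25, 25, 24, 26, 26, 25, 20, 23, 23, 25, 24, 24, 23, 25, 25, 24, 20, 23, 23, 25, 24, 24, 23, 25, 25, 24,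
  10, 16, 16, 18, 17, 17, 16, 18, 18, 17, 16, 19, 19, 21, 21, 20, 20, 22, 21, 21, 19, 22, 22, 24, 23, 23, 22, 24, 24, 23, 19, 22, 22, 24, 23, 23, 22, 24, 24, 23, 18, 21, 21, 23, 22, 22, 21, 23, 23, 22,
  18, 21, 21, 23, 22, 22, 21, 23, 23, 22, 18, 21, 21, 23, 22, 22, 21, 23, 23, 22, 20, 23, 23, 25, 24, 24, 23, 25, 25, 24, 19, 22, 22, 24, 23, 23, 22, 24, 24, 23, 19, 22, 22, 24, 23, 23, 22, 24, 24, 23,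
  12, 18, 18, 20, 19, 19, 18, 20, 20, 19, 18, 21, 21, 23, 23, 22, 22, 24, 23, 23, 21, 24, 24, 26, 25, 25, 24, 26, 26, 25, 21, 24, 24, 26, 25, 25, 24, 26, 26, 25, 20, 23, 23, 25, 24, 24, 23, 25, 25, 24,
  20, 23, 23, 25, 24, 24, 23, 25, 25, 24, 20, 23, 23, 25, 24, 24, 23, 25, 25, 24, 22, 25, 25, 27, 26, 26, 25, 27, 27, 26, 21, 24, 24, 26, 25, 25, 24, 26, 26, 25, 21, 24, 24, 26, 25, 25, 24, 26, 26, 25,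
  12, 18, 18, 20, 19, 19, 18, 20, 20, 19, 18, 21, 21, 23, 23, 22, 22, 24, 23, 23, 21, 24, 24, 26, 25, 25, 24, 26, 26, 25, 21, 24, 24, 26, 25, 25, 24, 26, 26, 25, 20, 23, 23, 25, 24, 24, 23, 25, 25, 24,
  20, 23, 23, 25, 24, 24, 23, 25, 25, 24, 20, 23, 23, 25, 24, 24, 23, 25, 25, 24, 22, 25, 25, 27, 26, 26, 25, 27, 27, 26, 21, 24, 24, 26, 25, 25, 24, 26, 26, 25, 21, 24, 24, 26, 25, 25, 24, 26, 26, 25,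
  11, 17, 17, 19, 18, 18, 17, 19, 19, 18, 17, 20, 20, 22, 22, 21, 21, 23, 22, 22, 20, 23, 23, 25, 24, 24, 23, 25, 25, 24, 20, 23, 23, 25, 24, 24, 23, 25, 25, 24, 19, 22, 22, 24, 23, 23, 22, 24, 24, 23,
  19, 22, 22, 24, 23, 23, 22, 24, 24, 23, 19, 22, 22, 24, 23, 23, 22, 24, 24, 23, 21, 24, 24, 26, 25, 25, 24, 26, 26, 25, 20, 23, 23, 25, 24, 24, 23, 25, 25, 24, 20, 23, 23, 25, 24, 24, 23, 25, 25, 24]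

set_option maxRecDepth 100000 in
set_option maxHeartbeats 4000000 in
theorem cTable_eq : cTable = cList := by decide

-- str.replace(' ', '') removes exactly the spaces
theorem replace_go_space : ∀ (fuel : Nat) (l acc : List Char), l.length ≤ fuel →
    PySem.Chars.replace.go [' '] [] fuel l acc = acc.reverse ++ l.filter (· ≠ ' ') := by
  intro fuel
  induction fuel with
  | zero => intro l acc h; simp at h; simp [h, PySem.Chars.replace.go]
  | succ f ih =>
    intro l acc h
    cases l with
    | nil => simp [PySem.Chars.replace.go]
    | cons c t =>
      rw [PySem.Chars.replace.go]
      by_cases hc : c = ' '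
      · subst hc
        have : List.isPrefixOf [' '] (' ' :: t) = true := by simp [List.isPrefixOf]
        simp only [this, if_true, show List.drop [' '].length (' ' :: t) = t from rfl,
          List.reverse_nil, List.nil_append]
        rw [ih t acc (by simp at h; omega)]
        simp
      · have : List.isPrefixOf [' '] (c :: t) = false := by
          simp [List.isPrefixOf]; exact fun hc2 => hc hc2.symm
        simp only [this, Bool.false_eq_true, if_false]
        rw [ih _ _ (by simp at h; omega)]
        simp [hc]

theorem replace_space (cs : List Char) :
    PySem.Chars.replace cs " ".toList "".toList = cs.filter (· ≠ ' ') := by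
  rw [PySem.Chars.replace]
  simp only [show (" ".toList) = [' '] from rfl, show ("".toList) = ([] : List Char) from rfl]
  rw [if_neg (by simp)]
  simpa using replace_go_space cs.length cs [] le_rfl

-- Nat.toDigits facts
theorem tdc_append : ∀ (f n : Nat) (acc : List Char),
    Nat.toDigitsCore 10 f n acc = Nat.toDigitsCore 10 f n [] ++ acc := by
  intro f
  induction f with
  | zero => intro n acc; simp [Nat.toDigitsCore]
  | succ f ih =>
    intro n acc
    rw [Nat.toDigitsCore, Nat.toDigitsCore]
    by_cases h : n / 10 = 0
    · simp [h]
    · simp only [h, if_false]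
      rw [ih (n/10) [Nat.digitChar (n % 10)], ih (n/10) (Nat.digitChar (n % 10) :: acc)]
      simp

theorem tdc_fuel : ∀ (n f g : Nat), n < f → n < g →
    Nat.toDigitsCore 10 f n [] = Nat.toDigitsCore 10 g n [] := by
  intro n
  induction n using Nat.strong_induction_on with
  | _ n ih =>
    intro f g hf hg
    obtain ⟨f', rfl⟩ : ∃ f', f = f' + 1 := ⟨f - 1, by omega⟩
    obtain ⟨g', rfl⟩ : ∃ g', g = g' + 1 := ⟨g - 1, by omega⟩
    rw [Nat.toDigitsCore, Nat.toDigitsCore]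
    by_cases h : n / 10 = 0
    · simp [h]
    · simp only [h, if_false]
      rw [tdc_append f', tdc_append g']
      have hlt : n / 10 < n := Nat.div_lt_self (by omega) (by omega)
      rw [ih (n/10) hlt f' g' (by omega) (by omega)]

theorem toDigits_step (m : Nat) (h : 10 ≤ m) :
    Nat.toDigits 10 m = Nat.toDigits 10 (m / 10) ++ [Nat.digitChar (m % 10)] := by
  show Nat.toDigitsCore 10 (m+1) m [] = Nat.toDigitsCore 10 (m/10+1) (m/10) [] ++ _
  rw [Nat.toDigitsCore]
  have h0 : ¬ (m / 10 = 0) := by omega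
  simp only [h0, if_false]
  rw [tdc_append m]
  rw [tdc_fuel (m/10) m (m/10+1) (by omega) (by omega)]

def pad3 (r : Nat) : List Char :=
  [Nat.digitChar (r / 100), Nat.digitChar (r / 10 % 10), Nat.digitChar (r % 10)]

theorem toChars_nat (m : Nat) : PySem.Int.toChars (m : Int) = Nat.toDigits 10 m := by
  rw [PySem.Int.toChars]
  rw [if_neg (by omega)]
  simp

theorem toChars_split (m : Nat) (h : 1000 ≤ m) :
    PySem.Int.toChars (m : Int) = PySem.Int.toChars ((m / 1000 : Nat) : Int) ++ pad3 (m % 1000) := by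
  rw [toChars_nat, toChars_nat]
  rw [toDigits_step m (by omega), toDigits_step (m/10) (by omega), toDigits_step (m/10/10) (by omega)]
  have e1 : m / 10 / 10 / 10 = m / 1000 := by omega
  have e2 : m / 10 / 10 % 10 = m % 1000 / 100 := by omega
  have e3 : m / 10 % 10 = m % 1000 / 10 % 10 := by omega
  have e4 : m % 10 = m % 1000 % 10 := by omega
  rw [e1, e2, e3, e4, pad3]
  simp

theorem toChars_len3 (m : Nat) (h : m < 1000) : (PySem.Int.toChars (m : Int)).length ≤ 3 := by
  rw [toChars_nat]
  exact Nat.toDigits_length 10 m 3 (by omega) (by omega)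

theorem tdc_ne_nil (f n : Nat) (h : 0 < f) (acc : List Char) :
    Nat.toDigitsCore 10 f n acc ≠ [] := by
  obtain ⟨f', rfl⟩ : ∃ f', f = f' + 1 := ⟨f - 1, by omega⟩
  rw [Nat.toDigitsCore]
  by_cases h0 : n / 10 = 0
  · simp [h0]
  · simp only [h0, if_false]
    rw [tdc_append]
    simp

theorem toChars_ne_nil (m : Nat) : PySem.Int.toChars (m : Int) ≠ [] := by
  rw [toChars_nat]
  exact tdc_ne_nil (m+1) m (by omega) []

-- breakout_places structure
theorem breakoutLoop_small (xs : List Char) (acc : List (List Char))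
    (h1 : xs ≠ []) (h2 : xs.length ≤ 3) : breakoutLoop xs acc = xs :: acc := by
  rw [breakoutLoop, dif_neg h1]
  rw [PySem.List.slice_to_neg_ofNat xs 3 (by omega), PySem.List.slice_from_neg_ofNat xs 3 (by omega)]
  have hx : xs.length - 3 = 0 := by omega
  rw [hx]
  simp only [List.take_zero, List.drop_zero, PySem.List.insert_zero]
  rw [breakoutLoop, dif_pos rfl]

theorem breakoutLoop_append3 (xs abc : List Char) (acc : List (List Char))
    (h1 : xs ≠ []) (h2 : abc.length = 3) :
    breakoutLoop (xs ++ abc) acc = breakoutLoop xs (abc :: acc) := by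
  rw [breakoutLoop, dif_neg (by simp [h1])]
  rw [PySem.List.slice_to_neg_ofNat _ 3 (by omega), PySem.List.slice_from_neg_ofNat _ 3 (by omega)]
  have hl : (xs ++ abc).length - 3 = xs.length := by simp [h2]
  rw [hl]
  rw [List.take_left' rfl, List.drop_left' rfl]
  simp [PySem.List.insert_zero]

-- per-group letter counts (finite checks)
set_option maxRecDepth 1000000 in
set_option maxHeartbeats 16000000 in
theorem L_parse_top : ∀ m : Nat, m < 1000 → 1 ≤ m →
    PySem.Int.ofChars? (PySem.Int.toChars (m : Int)) = some (m : Int) := by decide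

set_option maxRecDepth 1000000 in
set_option maxHeartbeats 16000000 in
theorem L_parse_pad : ∀ m : Nat, m < 1000 →
    PySem.Int.ofChars? (pad3 m) = some (m : Int) := by decide

set_option maxRecDepth 1000000 in
set_option maxHeartbeats 16000000 in
theorem L_word : ∀ m : Nat, m < 1000 →
    (((threeDigitOfInt (m : Int)).filter (· ≠ ' ')).length : Int) = cList.getD m 0 := by decide

theorem count_top (m : Nat) (h : m < 1000) (h1 : 1 ≤ m) :
    (((threeDigitNumWord (PySem.Int.toChars (m : Int))).filter (· ≠ ' ')).length : Int)
      = cList.getD m 0 := by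
  rw [threeDigitNumWord, L_parse_top m h h1]
  exact L_word m h

theorem count_pad (m : Nat) (h : m < 1000) :
    (((threeDigitNumWord (pad3 m)).filter (· ≠ ' ')).length : Int) = cList.getD m 0 := by
  rw [threeDigitNumWord, L_parse_pad m h]
  exact L_word m h

-- B-side loop shape
theorem groupLoop_add_aux : ∀ (k : Nat) (q a b : Int), q.toNat ≤ k →
    groupLoop q (a + b) = a + groupLoop q b := by
  intro k
  induction k with
  | zero =>
    intro q a b hk
    conv_lhs => rw [groupLoop]
    conv_rhs => rw [groupLoop]
    rw [dif_neg (by omega), dif_neg (by omega)]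
  | succ k ih =>
    intro q a b hk
    conv_lhs => rw [groupLoop]
    conv_rhs => rw [groupLoop]
    by_cases h : 0 < q
    · rw [dif_pos h, dif_pos h]
      have hdec : (PySem.Int.floordiv q 1000).toNat ≤ k := by
        rw [PySem.Int.floordiv_eq_ediv_of_pos (by omega)]; omega
      rw [show a + b + PySem.List.pyGetD cTable (PySem.Int.mod q 1000) 0 + 8
            = a + (b + PySem.List.pyGetD cTable (PySem.Int.mod q 1000) 0 + 8) by ring]
      exact ih _ _ _ hdec
    · rw [dif_neg h, dif_neg h]

theorem groupLoop_add (q a b : Int) : groupLoop q (a + b) = a + groupLoop q b :=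
  groupLoop_add_aux q.toNat q a b le_rfl


-- the per-i agreement
theorem per_i (i : Int) (h1 : 1 ≤ i) (h2 : i ≤ 999999999) :
    (((getNumString i).filter (· ≠ ' ')).length : Int)
      = groupLoop (PySem.Int.floordiv i 1000)
          (PySem.List.pyGetD cTable (PySem.Int.mod i 1000) 0) := by
  obtain ⟨m, rfl⟩ : ∃ m : Nat, i = (m : Int) := ⟨i.toNat, by omega⟩
  have hm1 : 1 ≤ m := by exact_mod_cast h1
  have hm2 : m ≤ 999999999 := by exact_mod_cast h2
  have hfd : PySem.Int.floordiv (m : Int) 1000 = ((m / 1000 : Nat) : Int) := by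
    exact_mod_cast PySem.Int.floordiv_natCast m 1000
  have hmd : PySem.Int.mod (m : Int) 1000 = ((m % 1000 : Nat) : Int) := by
    exact_mod_cast PySem.Int.mod_natCast m 1000
  have hget : PySem.List.pyGetD cTable ((m % 1000 : Nat) : Int) 0 = cList.getD (m % 1000) 0 := by
    rw [PySem.List.pyGetD_natCast, cTable_eq]
  rw [hfd, hmd, hget]
  by_cases hc1 : m < 1000
  · -- one group
    have hb : breakoutPlaces (m : Int) = [PySem.Int.toChars (m : Int)] := by
      rw [breakoutPlaces]
      exact breakoutLoop_small _ _ (toChars_ne_nil m) (toChars_len3 m hc1)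
    have hq0 : m / 1000 = 0 := by omega
    rw [hq0]
    conv_rhs => rw [groupLoop]
    rw [dif_neg (by norm_num)]
    have hmm : m % 1000 = m := by omega
    rw [hmm]
    simp only [getNumString, hb, PySem.List.enumerate_cons, PySem.List.enumerate_nil,
      List.foldl_cons, List.foldl_nil, PySem.List.len_eq, List.length_cons, List.length_nil]
    rw [if_neg (by norm_num)]
    rw [List.nil_append]
    exact count_top m hc1 hm1
  · by_cases hc2 : m < 1000000
    · -- two groups
      have hq1 : 1 ≤ m / 1000 := by omega
      have hql : m / 1000 < 1000 := by omega
      have hb : breakoutPlaces (m : Int) = [PySem.Int.toChars ((m / 1000 : Nat) : Int), pad3 (m % 1000)] := by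
        rw [breakoutPlaces, toChars_split m (by omega),
          breakoutLoop_append3 _ _ _ (toChars_ne_nil (m / 1000)) rfl]
        exact breakoutLoop_small _ _ (toChars_ne_nil (m / 1000)) (toChars_len3 (m / 1000) hql)
      conv_rhs => rw [groupLoop]
      rw [dif_pos (by exact_mod_cast Nat.cast_pos.mpr (by omega : 0 < m / 1000))]
      have hfd2 : PySem.Int.floordiv ((m / 1000 : Nat) : Int) 1000 = ((m / 1000 / 1000 : Nat) : Int) := by
        exact_mod_cast PySem.Int.floordiv_natCast (m / 1000) 1000
      have hmd2 : PySem.Int.mod ((m / 1000 : Nat) : Int) 1000 = ((m / 1000 % 1000 : Nat) : Int) := by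
        exact_mod_cast PySem.Int.mod_natCast (m / 1000) 1000
      rw [hfd2, hmd2, show m / 1000 / 1000 = 0 by omega, show m / 1000 % 1000 = m / 1000 by omega]
      conv_rhs => rw [groupLoop]
      rw [dif_neg (by norm_num)]
      rw [PySem.List.pyGetD_natCast, cTable_eq]
      simp only [getNumString, hb, PySem.List.enumerate_cons, PySem.List.enumerate_nil,
        List.foldl_cons, List.foldl_nil, PySem.List.len_eq, List.length_cons, List.length_nil]
      norm_num
      rw [show numLengthMap.getD 2 [] = "thousand".toList from by decide]
      have hcast : ((m : Int) / 1000) = ((m / 1000 : Nat) : Int) := by omega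
      rw [hcast]
      have ht := count_top (m / 1000) hql hq1
      have hp := count_pad (m % 1000) (by omega)
      simp only [ne_eq, decide_not, List.getD_eq_getElem?_getD] at ht hp
      rw [ht, hp, show (List.filter (fun x => !decide (x = ' ')) "thousand".toList).length = 8 from by decide]
      push_cast
      ring
    · -- three groups
      have hm6 : 1000000 ≤ m := by omega
      have hq1 : 1 ≤ m / 1000000 := by omega
      have hql : m / 1000000 < 1000 := by omega
      have hdd : m / 1000 / 1000 = m / 1000000 := by omega
      have hb : breakoutPlaces (m : Int)
          = [PySem.Int.toChars ((m / 1000000 : Nat) : Int), pad3 (m / 1000 % 1000), pad3 (m % 1000)] := by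
        rw [breakoutPlaces, toChars_split m (by omega), toChars_split (m / 1000) (by omega), hdd,
          breakoutLoop_append3 _ _ _ (List.append_ne_nil_of_left_ne_nil (toChars_ne_nil (m / 1000000)) _) rfl,
          breakoutLoop_append3 _ _ _ (toChars_ne_nil (m / 1000000)) rfl]
        exact breakoutLoop_small _ _ (toChars_ne_nil (m / 1000000)) (toChars_len3 (m / 1000000) hql)
      conv_rhs => rw [groupLoop]
      rw [dif_pos (by exact_mod_cast Nat.cast_pos.mpr (by omega : 0 < m / 1000))]
      have hfd2 : PySem.Int.floordiv ((m / 1000 : Nat) : Int) 1000 = ((m / 1000 / 1000 : Nat) : Int) := by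
        exact_mod_cast PySem.Int.floordiv_natCast (m / 1000) 1000
      have hmd2 : PySem.Int.mod ((m / 1000 : Nat) : Int) 1000 = ((m / 1000 % 1000 : Nat) : Int) := by
        exact_mod_cast PySem.Int.mod_natCast (m / 1000) 1000
      rw [hfd2, hmd2, hdd]
      conv_rhs => rw [groupLoop]
      rw [dif_pos (by exact_mod_cast Nat.cast_pos.mpr (by omega : 0 < m / 1000000))]
      have hfd3 : PySem.Int.floordiv ((m / 1000000 : Nat) : Int) 1000 = ((m / 1000000 / 1000 : Nat) : Int) := by
        exact_mod_cast PySem.Int.floordiv_natCast (m / 1000000) 1000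
      have hmd3 : PySem.Int.mod ((m / 1000000 : Nat) : Int) 1000 = ((m / 1000000 % 1000 : Nat) : Int) := by
        exact_mod_cast PySem.Int.mod_natCast (m / 1000000) 1000
      rw [hfd3, hmd3, show m / 1000000 / 1000 = 0 by omega, show m / 1000000 % 1000 = m / 1000000 by omega]
      conv_rhs => rw [groupLoop]
      rw [dif_neg (by norm_num)]
      rw [PySem.List.pyGetD_natCast, PySem.List.pyGetD_natCast, cTable_eq]
      simp only [getNumString, hb, PySem.List.enumerate_cons, PySem.List.enumerate_nil,
        List.foldl_cons, List.foldl_nil, PySem.List.len_eq, List.length_cons, List.length_nil]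
      norm_num
      rw [show numLengthMap.getD 3 [] = "milllion".toList from by decide,
        show numLengthMap.getD 2 [] = "thousand".toList from by decide]
      have hcast : ((m : Int) / 1000000) = ((m / 1000000 : Nat) : Int) := by omega
      rw [hcast]
      have ht := count_top (m / 1000000) hql hq1
      have hp1 := count_pad (m / 1000 % 1000) (by omega)
      have hp0 := count_pad (m % 1000) (by omega)
      simp only [ne_eq, decide_not, List.getD_eq_getElem?_getD] at ht hp1 hp0
      rw [ht, hp1, hp0,
        show (List.filter (fun x => !decide (x = ' ')) "thousand".toList).length = 8 from by decide,
        show (List.filter (fun x => !decide (x = ' ')) "milllion".toList).length = 8 from by decide]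
      push_cast
      ring

-- ===== VERDICT (by name: the statement is the Claim_ definition above) =====
theorem solution_spec : Claim_equal_solution := by
  intro n _ hpre
  show solution n = solution_alt n
  rw [solution, solution_alt]
  rw [PySem.List.foldl_append_singleton_eq_map, List.nil_append]
  rw [PySem.List.foldl_add (g := PySem.List.len)]
  rw [PySem.List.foldl_congr_mem (PySem.List.pyRange 1 (n + 1) 1)
      (fun total i => groupLoop (PySem.Int.floordiv i 1000)
          (total + PySem.List.pyGetD cTable (PySem.Int.mod i 1000) 0))
      (fun total i => total + groupLoop (PySem.Int.floordiv i 1000)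
          (PySem.List.pyGetD cTable (PySem.Int.mod i 1000) 0))
      0
      (fun acc i _ => groupLoop_add (PySem.Int.floordiv i 1000) acc
        (PySem.List.pyGetD cTable (PySem.Int.mod i 1000) 0))]
  rw [PySem.List.foldl_add]
  rw [List.map_map]
  refine congrArg (0 + ·) (congrArg List.sum (List.map_congr_left ?_))
  intro i hi
  rw [PySem.List.mem_pyRange_one] at hi
  have h2 : i ≤ 999999999 := by unfold Pre_solution at hpre; omega
  show PySem.List.len (PySem.Chars.replace (getNumString i) " ".toList "".toList) = _
  rw [replace_space, PySem.List.len_eq]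
  exact per_i i hi.1 h2
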